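-- pv_equiv track=rewrite | github.com/matjes993/WhatHaveIDone | core/cleaner.py | build_thread_index
-- ===== SOURCE A (Python) =====
-- def build_thread_index(all_entries):
--     """Build {threadId: [(msg_id, sort_key), ...]} sorted chronologically.
--     Uses internalDate when available, falls back to date header.
--     """
--     from collections import defaultdict
--     threads = defaultdict(list)
--
--     for entry in all_entries:
--         thread_id = entry.get("threadId", "")
--         if not thread_id:
--             continue
--
--         msg_id = entry.get("id", "")
--         internal_date = entry.get("internalDate", "")
--
--         if internal_date:
--             try:
--                 sort_key = int(internal_date)
--             except ValueError:
--                 sort_key = 0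
--         else:
--             sort_key = 0
--
--         threads[thread_id].append((msg_id, sort_key))
--
--     # Sort each thread chronologically
--     for thread_id in threads:
--         threads[thread_id].sort(key=lambda x: x[1])
--
--     return dict(threads)
-- ===== SOURCE B (Python) =====
-- def build_thread_index(all_entries):
--     """Build {threadId: [(msg_id, sort_key), ...]} sorted chronologically.
--
--     Sort-once-then-group: collect (thread_id, msg_id, sort_key) triples,
--     stably sort them all by sort_key once, then group in one pass.
--     """
--     triples = []
--     for entry in all_entries:
--         thread_id = entry.get("threadId", "")
--         if not thread_id:
--             continue
--         internal_date = entry.get("internalDate", "")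
--         if internal_date:
--             try:
--                 sort_key = int(internal_date)
--             except ValueError:
--                 sort_key = 0
--         else:
--             sort_key = 0
--         triples.append((thread_id, entry.get("id", ""), sort_key))
--
--     # keys in first-occurrence order, like A's dict
--     threads = {tid: [] for tid, _, _ in triples}
--     triples.sort(key=lambda t: t[2])  # stable: ties keep original order
--     for tid, msg_id, sort_key in triples:
--         threads[tid].append((msg_id, sort_key))
--     return threads
-- ===== Notes on version B (the rewrite author's own statement) =====
-- stated objective: alternative
-- what changed: Instead of grouping messages into per-thread lists and then sorting each thread's list separately, B collects all triples, performs ONE stable sort of the whole collection by sort_key, and then groups in a single pass (stability makes each group come out chronologically ordered with A's tie order).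
import Mathlib
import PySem

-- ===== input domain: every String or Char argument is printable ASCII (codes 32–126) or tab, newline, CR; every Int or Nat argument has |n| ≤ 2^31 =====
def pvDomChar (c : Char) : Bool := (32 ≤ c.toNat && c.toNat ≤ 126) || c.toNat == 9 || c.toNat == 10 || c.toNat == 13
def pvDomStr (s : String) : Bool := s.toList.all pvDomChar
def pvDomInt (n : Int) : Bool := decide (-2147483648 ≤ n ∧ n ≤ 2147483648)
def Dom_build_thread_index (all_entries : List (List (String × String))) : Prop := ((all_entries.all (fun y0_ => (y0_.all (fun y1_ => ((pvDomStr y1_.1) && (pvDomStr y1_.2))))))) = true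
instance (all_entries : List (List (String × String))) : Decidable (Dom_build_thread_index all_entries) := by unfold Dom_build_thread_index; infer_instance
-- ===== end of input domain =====

-- ===== PORT A =====
-- B differs only in decomposition: sort once then group, instead of group then sort each.
-- Shared primitive: entry.get(k, default) on the entry dicts (first-match lookup).
def pyGetStr (entry : List (String × String)) (k dflt : String) : String :=
  match entry.find? (fun p => p.1 == k) with
  | some p => p.2
  | none => dflt

-- sort_key: int(internal_date) with ValueError -> 0, empty string -> 0 (the same sub-expression in A and B)
def sortKeyOf (internal_date : String) : Int :=
  if internal_date = "" then 0 else (PySem.Int.ofStr? internal_date).getD 0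

def build_thread_index (all_entries : List (List (String × String))) : List (String × List (String × Int)) :=
  let threads : PySem.Dict String (List (String × Int)) :=
    all_entries.foldl (fun d entry =>
      let thread_id := pyGetStr entry "threadId" ""
      if thread_id = "" then d
      else
        let msg_id := pyGetStr entry "id" ""
        let sort_key := sortKeyOf (pyGetStr entry "internalDate" "")
        d.modify thread_id [] (fun v => v ++ [(msg_id, sort_key)])) PySem.Dict.empty
  -- for thread_id in threads: threads[thread_id].sort(key=lambda x: x[1]); return dict(threads)
  threads.items.map (fun kv => (kv.1, PySem.List.sorted kv.2 (fun x => x.2)))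

-- ===== PORT B =====
def build_thread_index_alt (all_entries : List (List (String × String))) : List (String × List (String × Int)) :=
  let triples : List (String × String × Int) :=
    all_entries.foldl (fun acc entry =>
      let thread_id := pyGetStr entry "threadId" ""
      if thread_id = "" then acc
      else acc ++ [(thread_id, pyGetStr entry "id" "", sortKeyOf (pyGetStr entry "internalDate" ""))]) []
  let threads : PySem.Dict String (List (String × Int)) :=
    triples.foldl (fun d t => d.insert t.1 []) PySem.Dict.empty
  let sortedTriples := PySem.List.sorted triples (fun t => t.2.2)
  (sortedTriples.foldl (fun d t => d.modify t.1 [] (fun v => v ++ [(t.2.1, t.2.2)])) threads).items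

-- ===== PRECONDITION & SPEC =====
def Spec_build_thread_index (all_entries : List (List (String × String))) (out : List (String × List (String × Int))) : Prop := out = build_thread_index_alt all_entries
instance (all_entries : List (List (String × String))) (out : List (String × List (String × Int))) : Decidable (Spec_build_thread_index all_entries out) := by unfold Spec_build_thread_index; infer_instance

-- ===== CLAIM (what is proved, stated in full; the proofs are below) =====
def Claim_equal_build_thread_index : Prop := ∀ (all_entries : List (List (String × String))), Dom_build_thread_index all_entries → Spec_build_thread_index all_entries (build_thread_index all_entries)

-- ===== LEMMAS AND PROOFS =====

-- the triple a non-skipped entry contributes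
def tripOf (entry : List (String × String)) : String × String × Int :=
  (pyGetStr entry "threadId" "", pyGetStr entry "id" "", sortKeyOf (pyGetStr entry "internalDate" ""))

-- the entries A does not skip
def keptEntry (entry : List (String × String)) : Bool :=
  !(pyGetStr entry "threadId" "" == "")

-- insertBy puts x in front when it goes before every element
theorem insertBy_of_forall_lt {α : Type} (lt : α → α → Bool) (x : α) (l : List α)
    (h : ∀ z ∈ l, lt x z = true) : PySem.List.insertBy lt x l = x :: l := by
  cases l with
  | nil => rfl
  | cons y ys => simp [PySem.List.insertBy, h y (by simp)]

-- projecting the thread id away commutes with insertBy (the comparison only reads the sort key)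
theorem map_insertBy (x : String × String × Int) (l : List (String × String × Int)) :
    (PySem.List.insertBy (fun a b => decide (a.2.2 < b.2.2)) x l).map (fun t => t.2)
      = PySem.List.insertBy (fun a b => decide (a.2 < b.2)) x.2 (l.map (fun t => t.2)) := by
  induction l with
  | nil => rfl
  | cons y ys ih =>
    by_cases h : x.2.2 < y.2.2
    · simp [PySem.List.insertBy, h]
    · simp [PySem.List.insertBy, h, ih]

-- filter over insertBy into a key-sorted list
theorem filter_insertBy (p : String × String × Int → Bool) (x : String × String × Int)
    (l : List (String × String × Int))
    (hl : l.Pairwise (fun a b => a.2.2 ≤ b.2.2)) :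
    (PySem.List.insertBy (fun a b => decide (a.2.2 < b.2.2)) x l).filter p
      = if p x then PySem.List.insertBy (fun a b => decide (a.2.2 < b.2.2)) x (l.filter p)
        else l.filter p := by
  induction l with
  | nil => by_cases hx : p x <;> simp [PySem.List.insertBy, hx]
  | cons y ys ih =>
    rcases List.pairwise_cons.mp hl with ⟨hy, hys⟩
    by_cases h : x.2.2 < y.2.2
    · simp only [PySem.List.insertBy, h, decide_true, if_true]
      by_cases hx : p x
      · have hfront : PySem.List.insertBy (fun a b => decide (a.2.2 < b.2.2)) x ((y :: ys).filter p)
            = x :: (y :: ys).filter p := by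
          apply insertBy_of_forall_lt
          intro z hz
          have hzmem : z ∈ y :: ys := List.mem_of_mem_filter hz
          have : x.2.2 < z.2.2 := by
            rcases List.mem_cons.mp hzmem with rfl | hzys
            · exact h
            · exact lt_of_lt_of_le h (hy z hzys)
          simpa using this
        simp [hx, hfront]
      · simp [hx, List.filter_cons]
    · simp only [PySem.List.insertBy, h, decide_false]
      by_cases hpy : p y
      · have hcons : PySem.List.insertBy (fun a b => decide (a.2.2 < b.2.2)) x (y :: ys.filter p)
            = y :: PySem.List.insertBy (fun a b => decide (a.2.2 < b.2.2)) x (ys.filter p) := by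
          simp [PySem.List.insertBy, h]
        by_cases hx : p x <;>
          simp [hpy, hx, ih hys, hcons]
      · by_cases hx : p x <;> simp [hpy, hx, ih hys]

-- appending one element to the input inserts it into the sorted output
theorem sorted_append_singleton (l : List (String × String × Int)) (x : String × String × Int) :
    PySem.List.sorted (l ++ [x]) (fun t => t.2.2)
      = PySem.List.insertBy (fun a b => decide (a.2.2 < b.2.2)) x
          (PySem.List.sorted l (fun t => t.2.2)) := by
  rw [PySem.List.sorted_eq_foldl_insertBy, PySem.List.sorted_eq_foldl_insertBy, List.foldl_append]
  rfl

theorem sorted_append_singleton_pair (l : List (String × Int)) (x : String × Int) :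
    PySem.List.sorted (l ++ [x]) (fun t => t.2)
      = PySem.List.insertBy (fun a b => decide (a.2 < b.2)) x
          (PySem.List.sorted l (fun t => t.2)) := by
  rw [PySem.List.sorted_eq_foldl_insertBy, PySem.List.sorted_eq_foldl_insertBy, List.foldl_append]
  rfl

-- the stable sort commutes with filtering (a thread's rows keep their stable order)
theorem filter_sorted (p : String × String × Int → Bool) (ts : List (String × String × Int)) :
    (PySem.List.sorted ts (fun t => t.2.2)).filter p
      = PySem.List.sorted (ts.filter p) (fun t => t.2.2) := by
  induction ts using List.reverseRecOn with
  | nil => rfl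
  | append_singleton ts x ih =>
    rw [sorted_append_singleton,
      filter_insertBy p x _ (PySem.List.sorted_pairwise ts (fun t => t.2.2)), ih,
      List.filter_append]
    by_cases hx : p x <;> simp [hx, sorted_append_singleton]

-- the stable sort commutes with dropping the thread id
theorem map_sorted (ts : List (String × String × Int)) :
    (PySem.List.sorted ts (fun t => t.2.2)).map (fun t => t.2)
      = PySem.List.sorted (ts.map (fun t => t.2)) (fun x => x.2) := by
  induction ts using List.reverseRecOn with
  | nil => rfl
  | append_singleton ts x ih =>
    rw [sorted_append_singleton, map_insertBy, ih, List.map_append]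
    simp only [List.map_cons, List.map_nil]
    rw [sorted_append_singleton_pair]

-- the dict built by B's key-collecting loop has only [] values
theorem getD_insert_nil_loop (ts : List (String × String × Int))
    (d : PySem.Dict String (List (String × Int))) (k : String)
    (hd : d.getD k [] = []) :
    (ts.foldl (fun d t => d.insert t.1 ([] : List (String × Int))) d).getD k [] = [] := by
  induction ts generalizing d with
  | nil => exact hd
  | cons t ts ih =>
    simp only [List.foldl_cons]
    apply ih
    rw [PySem.Dict.getD_insert]
    split <;> simp [hd]

theorem build_thread_index_eq (all_entries : List (List (String × String))) :
    build_thread_index all_entries = build_thread_index_alt all_entries := by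
  unfold build_thread_index build_thread_index_alt
  simp only [Prod.mk.eta]
  have hflip1 : ∀ (d : PySem.Dict String (List (String × Int))) (entry : List (String × String)),
      (if pyGetStr entry "threadId" "" = "" then d
       else d.modify (pyGetStr entry "threadId" "") []
          (fun v => v ++ [(pyGetStr entry "id" "", sortKeyOf (pyGetStr entry "internalDate" ""))]))
      = (if keptEntry entry
         then d.modify (tripOf entry).1 [] (fun v => v ++ [(tripOf entry).2]) else d) := by
    intro d entry
    by_cases h : pyGetStr entry "threadId" "" = "" <;> simp [h, keptEntry, tripOf]
  have hflip2 : ∀ (acc : List (String × String × Int)) (entry : List (String × String)),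
      (if pyGetStr entry "threadId" "" = "" then acc
       else acc ++ [(pyGetStr entry "threadId" "", pyGetStr entry "id" "",
          sortKeyOf (pyGetStr entry "internalDate" ""))])
      = (if keptEntry entry then acc ++ [tripOf entry] else acc) := by
    intro acc entry
    by_cases h : pyGetStr entry "threadId" "" = "" <;> simp [h, keptEntry, tripOf]
  simp only [hflip1, hflip2]
  have hAloop := PySem.List.foldl_if_eq_foldl_filter (p := keptEntry)
    (f := fun (d : PySem.Dict String (List (String × Int))) entry =>
      d.modify (tripOf entry).1 [] (fun v => v ++ [(tripOf entry).2]))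
    (l := all_entries) (init := PySem.Dict.empty)
  rw [PySem.List.foldl_append_if keptEntry tripOf, hAloop, List.nil_append]
  set ts := ((all_entries.filter keptEntry).map tripOf) with hts
  rw [show (all_entries.filter keptEntry).foldl
        (fun d entry => d.modify (tripOf entry).1 [] (fun v => v ++ [(tripOf entry).2]))
        PySem.Dict.empty
      = ts.foldl (fun d t => d.modify t.1 [] (fun v => v ++ [t.2])) PySem.Dict.empty
    from by rw [hts, List.foldl_map]]
  -- both sides are now functions of ts only
  set dA := ts.foldl (fun d t => d.modify t.1 [] (fun v => v ++ [t.2])) PySem.Dict.empty with hdA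
  set base := ts.foldl (fun d t => d.insert t.1 ([] : List (String × Int))) PySem.Dict.empty with hbase
  set dB := (PySem.List.sorted ts (fun t => t.2.2)).foldl
      (fun d t => d.modify t.1 [] (fun v => v ++ [t.2])) base with hdB
  have hkeysA : dA.keys = PySem.Set.ofList (ts.map (fun t => t.1)) := by
    rw [hdA, PySem.Dict.keys_foldl_modify_key ts (fun t => t.1) []
      (fun _ t => fun v => v ++ [t.2]) PySem.Dict.empty]
    simp [PySem.Dict.keys, PySem.Dict.empty, PySem.Set.update_nil_left]
  have hkeysBase : base.keys = PySem.Set.ofList (ts.map (fun t => t.1)) := by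
    rw [hbase, PySem.Dict.keys_foldl_insert_key ts (fun t => t.1)
      (fun _ _ => ([] : List (String × Int))) PySem.Dict.empty]
    simp [PySem.Dict.keys, PySem.Dict.empty, PySem.Set.update_nil_left]
  have hkeysB : dB.keys = PySem.Set.ofList (ts.map (fun t => t.1)) := by
    have hk := PySem.Dict.keys_foldl_modify_key (l := PySem.List.sorted ts (fun t => t.2.2))
      (key := fun t => t.1) (d0 := ([] : List (String × Int)))
      (f := fun _ t v => v ++ [t.2]) (d := base)
    rw [hdB, hk, hkeysBase, PySem.Set.update_eq_append_filter]
    rw [List.filter_eq_nil_iff.mpr, List.append_nil]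
    intro a ha
    have : a ∈ (PySem.List.sorted ts (fun t => t.2.2)).map (fun t => t.1) :=
      (PySem.Set.mem_ofList _ _).mp ha
    rcases List.mem_map.mp this with ⟨t, ht, rfl⟩
    have htts : t ∈ ts := (PySem.List.sorted_perm ts (fun t => t.2.2) false).mem_iff.mp ht
    simp only [PySem.Set.mem_ofList, Bool.not_eq_eq_eq_not, Bool.not_true,
      PySem.Set.contains_eq_listContains, List.contains_eq_mem, decide_eq_false_iff_not,
      Decidable.not_not, List.mem_map]
    exact ⟨t, htts, rfl⟩
  have hnodupA : dA.keys.Nodup := by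
    rw [hkeysA]; exact PySem.Set.nodup_ofList _
  have hnodupB : dB.keys.Nodup := by
    rw [hkeysB]; exact PySem.Set.nodup_ofList _
  have hvalA : ∀ k, dA.getD k [] = (ts.filter (fun t => t.1 == k)).map (fun t => t.2) := by
    intro k
    rw [hdA, PySem.Dict.getD_foldl_modify_append]
    simp [PySem.Dict.getD_empty]
  have hvalB : ∀ k, dB.getD k []
      = ((PySem.List.sorted ts (fun t => t.2.2)).filter (fun t => t.1 == k)).map (fun t => t.2) := by
    intro k
    rw [hdB, PySem.Dict.getD_foldl_modify_append]
    rw [hbase, getD_insert_nil_loop ts PySem.Dict.empty k (by simp [PySem.Dict.getD_empty]),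
      List.nil_append]
  have hperkey : ∀ k, PySem.List.sorted (dA.getD k []) (fun x => x.2) = dB.getD k [] := by
    intro k
    rw [hvalA, hvalB, filter_sorted, map_sorted]
  rw [PySem.Dict.items_eq_map_keys dA hnodupA [], PySem.Dict.items_eq_map_keys dB hnodupB [],
    hkeysA, hkeysB, List.map_map]
  apply List.map_congr_left
  intro k _
  simp only [Function.comp]
  rw [hperkey k]

-- ===== VERDICT (by name: the statement is the Claim_ definition above) =====
theorem build_thread_index_spec : Claim_equal_build_thread_index := by
  intro all_entries _
  unfold Spec_build_thread_index
  exact build_thread_index_eq all_entries
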